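-- pv_equiv track=rewrite | github.com/JW12450/DataStructure-Algorithm | Category/Implementation/18111_마인크래프트.py | find
-- ===== SOURCE A (Python) =====
-- def find(graph, h, b):
--     time = 0
--     for g in graph:
--         if g > h:
--             b += g - h
--             time += (g - h) * 2
--         else:
--             b -= h - g
--             time += (h - g)
--     """
--     for x in range(n):
--         for y in range(m):
--             if graph[x][y] == h:
--                 continue
--             elif graph[x][y] > h:
--                 b += graph[x][y] - h
--                 time += (graph[x][y] - h) * 2
--             else:
--                 b -= h - graph[x][y]
--                 time += (h - graph[x][y])
--     """
--
--     if b < 0: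
--         time = -1
--     return time
-- ===== SOURCE B (Python) =====
-- def find(graph, h, b):
--     # Branch-free algebraic formulation:
--     #   net = sum(g - h) = sum(graph) - len(graph)*h   (A's inventory changes by g-h in BOTH branches)
--     #   A's time = sum over g of (2(g-h) if g>h else h-g) = (3*sum|g-h| + net) // 2
--     n = len(graph)
--     s = sum(graph)
--     absdev = sum(abs(g - h) for g in graph)
--     net = s - n * h
--     if b + net < 0:
--         return -1
--     return (3 * absdev + net) // 2
-- ===== Notes on version B (the rewrite author's own statement) =====
-- stated objective: alternative
-- what changed: Replaces A's branching accumulator loop by a branch-free algebraic identity: the inventory changes by g-h in both of A's branches so the final inventory is b + sum(graph) - len*h, and the time equals (3*sum|g-h| + net)//2, computed from the aggregate sum and absolute deviation with no per-element case split.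
import Mathlib
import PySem

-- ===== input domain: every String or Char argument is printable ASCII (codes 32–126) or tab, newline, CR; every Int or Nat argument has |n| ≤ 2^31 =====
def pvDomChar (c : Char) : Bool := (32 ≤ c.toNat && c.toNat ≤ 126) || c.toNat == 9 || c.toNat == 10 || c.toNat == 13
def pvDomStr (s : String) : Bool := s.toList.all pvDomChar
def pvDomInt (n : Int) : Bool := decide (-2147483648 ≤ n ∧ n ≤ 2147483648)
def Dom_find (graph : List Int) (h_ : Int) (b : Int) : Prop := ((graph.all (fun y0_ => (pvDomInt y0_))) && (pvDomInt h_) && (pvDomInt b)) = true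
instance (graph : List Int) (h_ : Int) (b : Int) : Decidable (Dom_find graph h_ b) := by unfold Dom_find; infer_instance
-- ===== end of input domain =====

-- B replaces A's branching accumulator loop by a branch-free algebraic identity over aggregate
-- sums (sum, length, absolute deviation); objective: alternative decomposition, same cost.

-- ===== PORT A =====
def find (graph : List Int) (h_ : Int) (b : Int) : Int :=
  let st := graph.foldl (fun (st : Int × Int) g =>
    if g > h_ then (st.1 + (g - h_) * 2, st.2 + (g - h_))
    else (st.1 + (h_ - g), st.2 - (h_ - g))) (0, b)
  if st.2 < 0 then -1 else st.1

-- ===== PORT B =====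
def find_alt (graph : List Int) (h_ : Int) (b : Int) : Int :=
  let n : Int := graph.length
  let s := graph.sum
  let absdev := (graph.map (fun g => |g - h_|)).sum
  let net := s - n * h_
  if b + net < 0 then -1
  else PySem.Int.floordiv (3 * absdev + net) 2

-- ===== PRECONDITION & SPEC =====
def Spec_find (graph : List Int) (h_ : Int) (b : Int) (out : Int) : Prop := out = find_alt graph h_ b
instance (graph : List Int) (h_ : Int) (b : Int) (out : Int) : Decidable (Spec_find graph h_ b out) := by unfold Spec_find; infer_instance

-- ===== CLAIM (what is proved, stated in full; the proofs are below) =====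
def Claim_equal_find : Prop := ∀ (graph : List Int) (h_ : Int) (b : Int), Dom_find graph h_ b → Spec_find graph h_ b (find graph h_ b)

-- ===== LEMMAS AND PROOFS =====

-- A's loop state after the whole list: time component and inventory component in aggregate form.
theorem find_foldl_eq (graph : List Int) (h_ : Int) (t b : Int) :
    graph.foldl (fun (st : Int × Int) g =>
      if g > h_ then (st.1 + (g - h_) * 2, st.2 + (g - h_))
      else (st.1 + (h_ - g), st.2 - (h_ - g))) (t, b)
    = (t + (graph.map (fun g => if g > h_ then (g - h_) * 2 else h_ - g)).sum,
       b + (graph.sum - (graph.length : Int) * h_)) := by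
  induction graph generalizing t b with
  | nil => simp
  | cons g gs ih =>
    by_cases hg : g > h_ <;>
      · simp only [List.foldl_cons, ih, hg, List.map_cons, List.sum_cons, List.length_cons]
        simp [Prod.ext_iff]
        constructor <;> ring

-- Twice A's time equals 3*absdev + net, elementwise.
theorem two_mul_time (graph : List Int) (h_ : Int) :
    2 * (graph.map (fun g => if g > h_ then (g - h_) * 2 else h_ - g)).sum
    = 3 * (graph.map (fun g => |g - h_|)).sum + (graph.sum - (graph.length : Int) * h_) := by
  induction graph with
  | nil => simp
  | cons g gs ih =>
    simp only [List.map_cons, List.sum_cons, List.length_cons]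
    by_cases hg : g > h_
    · rw [abs_of_nonneg (by omega : (0:Int) ≤ g - h_)]
      simp only [hg, if_pos]
      have hd : ((gs.length : Int) + 1) * h_ = (gs.length : Int) * h_ + h_ := by ring
      push_cast; omega
    · rw [abs_of_nonpos (by omega : g - h_ ≤ (0:Int))]
      simp only [hg, if_neg, not_false_iff]
      have hd : ((gs.length : Int) + 1) * h_ = (gs.length : Int) * h_ + h_ := by ring
      push_cast; omega

-- ===== VERDICT (by name: the statement is the Claim_ definition above) =====
theorem find_spec : Claim_equal_find := by
  intro graph h_ b _
  unfold Spec_find find find_alt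
  rw [find_foldl_eq]
  set T := (graph.map (fun g => if g > h_ then (g - h_) * 2 else h_ - g)).sum with hT
  set net := graph.sum - (graph.length : Int) * h_ with hnet
  have h2 : 3 * (graph.map (fun g => |g - h_|)).sum + net = 2 * T := (two_mul_time graph h_).symm
  simp only [hnet] at h2 ⊢
  by_cases hb : b + (graph.sum - (graph.length : Int) * h_) < 0
  · simp [hb]
  · simp only [hb, if_neg, not_false_iff]
    rw [show 3 * (graph.map (fun g => |g - h_|)).sum + (graph.sum - (graph.length : Int) * h_) = 2 * T from h2,
      PySem.Int.floordiv_eq_ediv_of_pos (by norm_num)]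
    omega
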